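-- pv_equiv track=rewrite | github.com/Still-Here-0/Barreiras | Codigo_Barreira.py | wall_interaction
-- ===== SOURCE A (Python) =====
-- def interaction_p_w():
-- 	interac = {\
-- 	'0_0':['A1','B1','A2','B2'],'0_1':['B1','C1','B2','C2'],'0_2':['C1','D1','C2','D2'],'0_3':['D1','E1','D2','E2'],\
-- 	'0_4':['E1','F1','E2','F2'],'0_5':['F1','G1','F2','G2'],'0_6':['G1','H1','G2','H2'],'0_7':['H1','I1','H2','I2'],\
-- 	\
-- 	'1_0':['A2','B2','A3','B3'],'1_1':['B2','C2','B3','C3'],'1_2':['C2','D2','C3','D3'],'1_3':['D2','E2','D3','E3'],\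
-- 	'1_4':['E2','F2','E3','F3'],'1_5':['F2','G2','F3','G3'],'1_6':['G2','H2','G3','H3'],'1_7':['H2','I2','H3','I3'],\
-- 	\
-- 	'2_0':['A3','B3','A4','B4'],'2_1':['B3','C3','B4','C4'],'2_2':['C3','D3','C4','D4'],'2_3':['D3','E3','D4','E4'],\
-- 	'2_4':['E3','F3','E4','F4'],'2_5':['F3','G3','F4','G4'],'2_6':['G3','H3','G4','H4'],'2_7':['H3','I3','H4','I4'],\
-- 	\
-- 	'3_0':['A4','B4','A5','B5'],'3_1':['B4','C4','B5','C5'],'3_2':['C4','D4','C5','D5'],'3_3':['D4','E4','D5','E5'],\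
-- 	'3_4':['E4','F4','E5','F5'],'3_5':['F4','G4','F5','G5'],'3_6':['G4','H4','G5','H5'],'3_7':['H4','I4','H5','I5'],\
-- 	\
-- 	'4_0':['A5','B5','A6','B6'],'4_1':['B5','C5','B6','C6'],'4_2':['C5','D5','C6','D6'],'4_3':['D5','E5','D6','E6'],\
-- 	'4_4':['E5','F5','E6','F6'],'4_5':['F5','G5','F6','G6'],'4_6':['G5','H5','G6','H6'],'4_7':['H5','I5','H6','I6'],\
-- 	\
-- 	'5_0':['A6','B6','A7','B7'],'5_1':['B6','C6','B7','C7'],'5_2':['C6','D6','C7','D7'],'5_3':['D6','E6','D7','E7'],\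
-- 	'5_4':['E6','F6','E7','F7'],'5_5':['F6','G6','F7','G7'],'5_6':['G6','H6','G7','H7'],'5_7':['H6','I6','H7','I7'],\
-- 	\
-- 	'6_0':['A7','B7','A8','B8'],'6_1':['B7','C7','B8','C8'],'6_2':['C7','D7','C8','D8'],'6_3':['D7','E7','D8','E8'],\
-- 	'6_4':['E7','F7','E8','F8'],'6_5':['F7','G7','F8','G8'],'6_6':['G7','H7','G8','H8'],'6_7':['H7','I7','H8','I8'],\
-- 	\
-- 	'7_0':['A8','B8','A9','B9'],'7_1':['B8','C8','B9','C9'],'7_2':['C8','D8','C9','D9'],'7_3':['D8','E8','D9','E9'],\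
-- 	'7_4':['E8','F8','E9','F9'],'7_5':['F8','G8','F9','G9'],'7_6':['G8','H8','G9','H9'],'7_7':['H8','I8','H9','I9']\
-- 	}
-- 	return interac
--
-- def wall_interaction(lines, mov):
-- 	ract = interaction_p_w()
-- 	for line in lines:
-- 		#qual linha estamos botando a barreira
-- 		fist = str(line[0])
-- 		second = '_'
-- 		wall_indx = 0
-- 		for wall in line[1]:
-- 			#qual coluna estamos botando a barreira
-- 			third = str(wall_indx)
-- 			key = fist + second + third
-- 			#Se tiver uma barreira nessa coordenada os movimentos dos pioes sao restringidos
-- 			if wall[0]: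
-- 				if wall[1] == '|':
-- 					mov[ract[key][0]][1] = '  '
-- 					mov[ract[key][1]][3] = '  '
-- 					mov[ract[key][2]][1] = '  '
-- 					mov[ract[key][3]][3] = '  '
-- 				elif wall[1] == '-':
-- 					mov[ract[key][0]][2] = '  '
-- 					mov[ract[key][1]][2] = '  '
-- 					mov[ract[key][2]][0] = '  '
-- 					mov[ract[key][3]][0] = '  '
-- 			wall_indx += 1
-- 	return mov
-- ===== SOURCE B (Python) =====
-- def wall_interaction(lines, mov):
--     # Two staged passes: first collect the set of (cell, slot) positions any wall
--     # blanks; then rebuild every movement list pointwise from that set.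
--     # (Return-value equivalence with A: A mutates mov's inner lists in place and
--     # returns mov; B returns a freshly built dict and leaves mov untouched.)
--     cols = 'ABCDEFGHI'
--     blanked = set()
--     for r, walls in lines:
--         for c, (active, kind) in enumerate(walls):
--             if active and 0 <= r <= 7 and 0 <= c <= 7:
--                 if kind == '|':
--                     blanked.update({(cols[c] + str(r + 1), 1),
--                                     (cols[c + 1] + str(r + 1), 3),
--                                     (cols[c] + str(r + 2), 1),
--                                     (cols[c + 1] + str(r + 2), 3)})
--                 elif kind == '-':
--                     blanked.update({(cols[c] + str(r + 1), 2),
--                                     (cols[c + 1] + str(r + 1), 2),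
--                                     (cols[c] + str(r + 2), 0),
--                                     (cols[c + 1] + str(r + 2), 0)})
--     return {cell: ['  ' if (cell, i) in blanked else v for i, v in enumerate(lst)]
--             for cell, lst in mov.items()}
-- ===== Notes on version B (the rewrite author's own statement) =====
-- stated objective: alternative
-- what changed: Replaces A's single mutating pass through the 64-entry interaction table by two staged passes: pass 1 collects the set of (cell, slot) positions blanked by any wall (cell names computed arithmetically from row/column), pass 2 rebuilds every movement list pointwise from that set instead of mutating mov in place.
-- outside the precondition, e.g. on wall_interaction([(8, [(True, '|')])], {}): A raises KeyError, B returns {}; on wall_interaction([(0, [(True, '|')])], {}): A raises KeyError, B returns {}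
import Mathlib
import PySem

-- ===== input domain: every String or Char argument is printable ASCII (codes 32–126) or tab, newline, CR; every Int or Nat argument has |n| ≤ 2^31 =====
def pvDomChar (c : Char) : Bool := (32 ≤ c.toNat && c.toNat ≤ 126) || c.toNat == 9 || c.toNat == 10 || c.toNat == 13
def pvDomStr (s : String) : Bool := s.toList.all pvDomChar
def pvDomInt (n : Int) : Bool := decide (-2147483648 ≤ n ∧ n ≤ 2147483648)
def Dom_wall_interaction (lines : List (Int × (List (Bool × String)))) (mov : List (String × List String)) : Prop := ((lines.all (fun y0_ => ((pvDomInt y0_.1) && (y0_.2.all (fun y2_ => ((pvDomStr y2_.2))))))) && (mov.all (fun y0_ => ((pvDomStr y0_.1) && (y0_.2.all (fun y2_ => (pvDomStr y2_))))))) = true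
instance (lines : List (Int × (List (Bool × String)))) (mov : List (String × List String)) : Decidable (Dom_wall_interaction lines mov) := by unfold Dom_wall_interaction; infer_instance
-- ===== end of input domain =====

-- B restructures A into two staged passes: first collect the set of (cell, slot) positions any
-- wall blanks (cell names computed arithmetically instead of A's 64-entry table), then rebuild
-- every movement list pointwise from that set.  Objective: alternative.  The Python A mutates
-- mov's inner lists in place and returns mov, the Python B builds a fresh dict and leaves mov
-- untouched; the equivalence proved here is about the return value.

-- ===== PORT A =====
def interaction_p_w : PySem.Dict String (List String) :=
  PySem.Dict.mk [("0_0", ["A1","B1","A2","B2"]),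
    ("0_1", ["B1","C1","B2","C2"]),
    ("0_2", ["C1","D1","C2","D2"]),
    ("0_3", ["D1","E1","D2","E2"]),
    ("0_4", ["E1","F1","E2","F2"]),
    ("0_5", ["F1","G1","F2","G2"]),
    ("0_6", ["G1","H1","G2","H2"]),
    ("0_7", ["H1","I1","H2","I2"]),
    ("1_0", ["A2","B2","A3","B3"]),
    ("1_1", ["B2","C2","B3","C3"]),
    ("1_2", ["C2","D2","C3","D3"]),
    ("1_3", ["D2","E2","D3","E3"]),
    ("1_4", ["E2","F2","E3","F3"]),
    ("1_5", ["F2","G2","F3","G3"]),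
    ("1_6", ["G2","H2","G3","H3"]),
    ("1_7", ["H2","I2","H3","I3"]),
    ("2_0", ["A3","B3","A4","B4"]),
    ("2_1", ["B3","C3","B4","C4"]),
    ("2_2", ["C3","D3","C4","D4"]),
    ("2_3", ["D3","E3","D4","E4"]),
    ("2_4", ["E3","F3","E4","F4"]),
    ("2_5", ["F3","G3","F4","G4"]),
    ("2_6", ["G3","H3","G4","H4"]),
    ("2_7", ["H3","I3","H4","I4"]),
    ("3_0", ["A4","B4","A5","B5"]),
    ("3_1", ["B4","C4","B5","C5"]),
    ("3_2", ["C4","D4","C5","D5"]),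
    ("3_3", ["D4","E4","D5","E5"]),
    ("3_4", ["E4","F4","E5","F5"]),
    ("3_5", ["F4","G4","F5","G5"]),
    ("3_6", ["G4","H4","G5","H5"]),
    ("3_7", ["H4","I4","H5","I5"]),
    ("4_0", ["A5","B5","A6","B6"]),
    ("4_1", ["B5","C5","B6","C6"]),
    ("4_2", ["C5","D5","C6","D6"]),
    ("4_3", ["D5","E5","D6","E6"]),
    ("4_4", ["E5","F5","E6","F6"]),
    ("4_5", ["F5","G5","F6","G6"]),
    ("4_6", ["G5","H5","G6","H6"]),
    ("4_7", ["H5","I5","H6","I6"]),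
    ("5_0", ["A6","B6","A7","B7"]),
    ("5_1", ["B6","C6","B7","C7"]),
    ("5_2", ["C6","D6","C7","D7"]),
    ("5_3", ["D6","E6","D7","E7"]),
    ("5_4", ["E6","F6","E7","F7"]),
    ("5_5", ["F6","G6","F7","G7"]),
    ("5_6", ["G6","H6","G7","H7"]),
    ("5_7", ["H6","I6","H7","I7"]),
    ("6_0", ["A7","B7","A8","B8"]),
    ("6_1", ["B7","C7","B8","C8"]),
    ("6_2", ["C7","D7","C8","D8"]),
    ("6_3", ["D7","E7","D8","E8"]),
    ("6_4", ["E7","F7","E8","F8"]),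
    ("6_5", ["F7","G7","F8","G8"]),
    ("6_6", ["G7","H7","G8","H8"]),
    ("6_7", ["H7","I7","H8","I8"]),
    ("7_0", ["A8","B8","A9","B9"]),
    ("7_1", ["B8","C8","B9","C9"]),
    ("7_2", ["C8","D8","C9","D9"]),
    ("7_3", ["D8","E8","D9","E9"]),
    ("7_4", ["E8","F8","E9","F9"]),
    ("7_5", ["F8","G8","F9","G9"]),
    ("7_6", ["G8","H8","G9","H9"]),
    ("7_7", ["H8","I8","H9","I9"])]

-- mov is a Python dict; per the type convention it arrives as an association list and the port
-- works on it through PySem.Dict.  ract[key] (KeyError), mov[cell] (KeyError) and list[i] = v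
-- (IndexError) are totalised with getD/modify/pySetD; Pre_wall_interaction excludes exactly the
-- inputs where Python raises, so every default is dead under Pre_.
def wall_interaction (lines : List (Int × (List (Bool × String)))) (mov : List (String × List String)) : List (String × List String) :=
  let ract := interaction_p_w
  (lines.foldl
    (fun (m : PySem.Dict String (List String)) line =>
      let fist := PySem.Int.toStr line.1
      let second := "_"
      (line.2.foldl
        (fun (st : PySem.Dict String (List String) × Int) wall =>
          let third := PySem.Int.toStr st.2
          let key := fist ++ second ++ third
          let m :=
            if wall.1 then
              if wall.2 == "|" then
                let m := st.1.modify (PySem.List.pyGetD (ract.getD key []) 0 "") [] (fun l => PySem.List.pySetD l 1 "  ")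
                let m := m.modify (PySem.List.pyGetD (ract.getD key []) 1 "") [] (fun l => PySem.List.pySetD l 3 "  ")
                let m := m.modify (PySem.List.pyGetD (ract.getD key []) 2 "") [] (fun l => PySem.List.pySetD l 1 "  ")
                m.modify (PySem.List.pyGetD (ract.getD key []) 3 "") [] (fun l => PySem.List.pySetD l 3 "  ")
              else if wall.2 == "-" then
                let m := st.1.modify (PySem.List.pyGetD (ract.getD key []) 0 "") [] (fun l => PySem.List.pySetD l 2 "  ")
                let m := m.modify (PySem.List.pyGetD (ract.getD key []) 1 "") [] (fun l => PySem.List.pySetD l 2 "  ")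
                let m := m.modify (PySem.List.pyGetD (ract.getD key []) 2 "") [] (fun l => PySem.List.pySetD l 0 "  ")
                m.modify (PySem.List.pyGetD (ract.getD key []) 3 "") [] (fun l => PySem.List.pySetD l 0 "  ")
              else st.1
            else st.1
          (m, st.2 + 1))
        (m, 0)).1)
    (PySem.Dict.ofList mov)).items

-- ===== PORT B =====
-- cols[c] + str(r + dr); cols[c] is guard-protected in B, the getD "" default is dead there
def wiCell (r c dr : Int) : String :=
  ((PySem.Str.pyGet? "ABCDEFGHI" c).map (fun ch => String.singleton ch)).getD "" ++ PySem.Int.toStr (r + dr)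

def wall_interaction_alt (lines : List (Int × (List (Bool × String)))) (mov : List (String × List String)) : List (String × List String) :=
  -- pass 1: the set of blanked (cell, slot) positions
  let blanked : PySem.Set (String × Int) :=
    lines.foldl
      (fun (s : PySem.Set (String × Int)) line =>
        (PySem.List.enumerate line.2 0).foldl
          (fun (s : PySem.Set (String × Int)) p =>
            if p.2.1 && decide (0 ≤ line.1) && decide (line.1 ≤ 7) && decide (0 ≤ p.1) && decide (p.1 ≤ 7) then
              if p.2.2 == "|" then
                PySem.Set.update s [(wiCell line.1 p.1 1, 1), (wiCell line.1 (p.1 + 1) 1, 3), (wiCell line.1 p.1 2, 1), (wiCell line.1 (p.1 + 1) 2, 3)]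
              else if p.2.2 == "-" then
                PySem.Set.update s [(wiCell line.1 p.1 1, 2), (wiCell line.1 (p.1 + 1) 1, 2), (wiCell line.1 p.1 2, 0), (wiCell line.1 (p.1 + 1) 2, 0)]
              else s
            else s)
          s)
      PySem.Set.empty
  -- pass 2: rebuild every movement list pointwise
  (PySem.Dict.ofList mov).items.map
    (fun q => (q.1, (PySem.List.enumerate q.2 0).map (fun iv => if blanked.contains (q.1, iv.1) then "  " else iv.2)))

-- ===== PRECONDITION & SPEC =====
-- Pre_ is exactly the inputs on which Python A returns: for every armed wall whose symbol is
-- '|' or '-', the row is 0..7 and the column 0..7 (else ract[key] raises KeyError) and the four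
-- affected cells are keys of mov whose lists are long enough for the indices assigned
-- (else mov[cell] raises KeyError / the item assignment raises IndexError).
def Pre_wall_interaction (lines : List (Int × (List (Bool × String)))) (mov : List (String × List String)) : Prop :=
  ∀ line ∈ lines, ∀ p ∈ PySem.List.enumerate line.2 0,
    p.2.1 = true → (p.2.2 = "|" ∨ p.2.2 = "-") →
      0 ≤ line.1 ∧ line.1 ≤ 7 ∧ p.1 ≤ 7 ∧
      (p.2.2 = "|" →
        1 < ((PySem.Dict.ofList mov).getD (wiCell line.1 p.1 1) []).length ∧
        3 < ((PySem.Dict.ofList mov).getD (wiCell line.1 (p.1 + 1) 1) []).length ∧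
        1 < ((PySem.Dict.ofList mov).getD (wiCell line.1 p.1 2) []).length ∧
        3 < ((PySem.Dict.ofList mov).getD (wiCell line.1 (p.1 + 1) 2) []).length) ∧
      (p.2.2 = "-" →
        2 < ((PySem.Dict.ofList mov).getD (wiCell line.1 p.1 1) []).length ∧
        2 < ((PySem.Dict.ofList mov).getD (wiCell line.1 (p.1 + 1) 1) []).length ∧
        0 < ((PySem.Dict.ofList mov).getD (wiCell line.1 p.1 2) []).length ∧
        0 < ((PySem.Dict.ofList mov).getD (wiCell line.1 (p.1 + 1) 2) []).length)
instance (lines : List (Int × (List (Bool × String)))) (mov : List (String × List String)) : Decidable (Pre_wall_interaction lines mov) := by unfold Pre_wall_interaction; infer_instance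

def pvWitness_wall_interaction : (List (Int × (List (Bool × String)))) × (List (String × List String)) :=
  ([(0, [(true, "|")])],
   [("A1", ["N", "S"]), ("B1", ["N", "S", "E", "W"]), ("A2", ["N", "S"]), ("B2", ["N", "S", "E", "W"])])

def Spec_wall_interaction (lines : List (Int × (List (Bool × String)))) (mov : List (String × List String)) (out : List (String × List String)) : Prop := out = wall_interaction_alt lines mov
instance (lines : List (Int × (List (Bool × String)))) (mov : List (String × List String)) (out : List (String × List String)) : Decidable (Spec_wall_interaction lines mov out) := by unfold Spec_wall_interaction; infer_instance

-- ===== CLAIM (what is proved, stated in full; the proofs are below) =====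
def Claim_equal_wall_interaction : Prop := ∀ (lines : List (Int × (List (Bool × String)))) (mov : List (String × List String)), Dom_wall_interaction lines mov → Pre_wall_interaction lines mov → Spec_wall_interaction lines mov (wall_interaction lines mov)

-- ===== LEMMAS AND PROOFS =====

-- the list of (cell, slot) blanking operations one wall contributes
def wiOps (r : Int) (p : Int × (Bool × String)) : List (String × Int) :=
  if p.2.1 && decide (0 ≤ r) && decide (r ≤ 7) && decide (0 ≤ p.1) && decide (p.1 ≤ 7) then
    if p.2.2 == "|" then
      [(wiCell r p.1 1, 1), (wiCell r (p.1 + 1) 1, 3), (wiCell r p.1 2, 1), (wiCell r (p.1 + 1) 2, 3)]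
    else if p.2.2 == "-" then
      [(wiCell r p.1 1, 2), (wiCell r (p.1 + 1) 1, 2), (wiCell r p.1 2, 0), (wiCell r (p.1 + 1) 2, 0)]
    else []
  else []

def wiAllOps (lines : List (Int × (List (Bool × String)))) : List (String × Int) :=
  lines.flatMap (fun line => (PySem.List.enumerate line.2 0).flatMap (wiOps line.1))

-- one blanking operation on the movement dict
def wiBlank (d : PySem.Dict String (List String)) (op : String × Int) : PySem.Dict String (List String) :=
  d.modify op.1 [] (fun l => PySem.List.pySetD l op.2 "  ")

-- A's inner loop body (the fold over one line's walls, state = (dict, wall_indx))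
def wiA_in (fist : String) (st : PySem.Dict String (List String) × Int) (wall : Bool × String) : PySem.Dict String (List String) × Int :=
  let third := PySem.Int.toStr st.2
  let key := fist ++ "_" ++ third
  let m :=
    if wall.1 then
      if wall.2 == "|" then
        let m := st.1.modify (PySem.List.pyGetD (interaction_p_w.getD key []) 0 "") [] (fun l => PySem.List.pySetD l 1 "  ")
        let m := m.modify (PySem.List.pyGetD (interaction_p_w.getD key []) 1 "") [] (fun l => PySem.List.pySetD l 3 "  ")
        let m := m.modify (PySem.List.pyGetD (interaction_p_w.getD key []) 2 "") [] (fun l => PySem.List.pySetD l 1 "  ")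
        m.modify (PySem.List.pyGetD (interaction_p_w.getD key []) 3 "") [] (fun l => PySem.List.pySetD l 3 "  ")
      else if wall.2 == "-" then
        let m := st.1.modify (PySem.List.pyGetD (interaction_p_w.getD key []) 0 "") [] (fun l => PySem.List.pySetD l 2 "  ")
        let m := m.modify (PySem.List.pyGetD (interaction_p_w.getD key []) 1 "") [] (fun l => PySem.List.pySetD l 2 "  ")
        let m := m.modify (PySem.List.pyGetD (interaction_p_w.getD key []) 2 "") [] (fun l => PySem.List.pySetD l 0 "  ")
        m.modify (PySem.List.pyGetD (interaction_p_w.getD key []) 3 "") [] (fun l => PySem.List.pySetD l 0 "  ")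
      else st.1
    else st.1
  (m, st.2 + 1)

theorem wiA_unfold (lines : List (Int × (List (Bool × String)))) (mov : List (String × List String)) :
    wall_interaction lines mov =
      (lines.foldl (fun m line => (line.2.foldl (wiA_in (PySem.Int.toStr line.1)) (m, 0)).1) (PySem.Dict.ofList mov)).items := rfl

-- the 64 in-range table entries are exactly the arithmetically computed cell names
theorem wi_cells_eq : ∀ (r c : Int), 0 ≤ r → r ≤ 7 → 0 ≤ c → c ≤ 7 →
    interaction_p_w.getD (PySem.Int.toStr r ++ "_" ++ PySem.Int.toStr c) [] =
      [wiCell r c 1, wiCell r (c + 1) 1, wiCell r c 2, wiCell r (c + 1) 2] := by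
  intro r c h1 h2 h3 h4
  interval_cases r <;> interval_cases c <;> decide

theorem wi_step_eq (r k : Int) (m : PySem.Dict String (List String)) (wall : Bool × String)
    (hk : 0 ≤ k)
    (h : wall.1 = true → (wall.2 = "|" ∨ wall.2 = "-") → 0 ≤ r ∧ r ≤ 7 ∧ k ≤ 7) :
    wiA_in (PySem.Int.toStr r) (m, k) wall = ((wiOps r (k, wall)).foldl wiBlank m, k + 1) := by
  unfold wiA_in wiOps wiBlank
  by_cases hw : wall.1 = true
  · by_cases h1 : wall.2 = "|"
    · obtain ⟨hr0, hr7, hk7⟩ := h hw (Or.inl h1)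
      simp only [hw, h1, wi_cells_eq r k hr0 hr7 hk hk7]
      simp [PySem.List.pyGetD, PySem.List.pyGet?, PySem.List.pyIdx?, hr0, hr7, hk, hk7]
    · by_cases h2 : wall.2 = "-"
      · obtain ⟨hr0, hr7, hk7⟩ := h hw (Or.inr h2)
        simp only [hw, h2, wi_cells_eq r k hr0 hr7 hk hk7]
        simp [PySem.List.pyGetD, PySem.List.pyGet?, PySem.List.pyIdx?, hr0, hr7, hk, hk7, h1]
      · simp [hw, h1, h2]
  · simp [hw]

theorem wi_inner_eq (r : Int) (walls : List (Bool × String)) :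
    ∀ (k : Int) (m : PySem.Dict String (List String)), 0 ≤ k →
    (∀ p ∈ PySem.List.enumerate walls k, p.2.1 = true → (p.2.2 = "|" ∨ p.2.2 = "-") →
        0 ≤ r ∧ r ≤ 7 ∧ p.1 ≤ 7) →
    (walls.foldl (wiA_in (PySem.Int.toStr r)) (m, k)).1 =
      ((PySem.List.enumerate walls k).flatMap (wiOps r)).foldl wiBlank m := by
  induction walls with
  | nil => intro k m _ _; simp [PySem.List.enumerate_nil]
  | cons w ws ih =>
    intro k m hk hpre
    rw [PySem.List.enumerate_cons] at *
    have hw : wiA_in (PySem.Int.toStr r) (m, k) w = ((wiOps r (k, w)).foldl wiBlank m, k + 1) :=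
      wi_step_eq r k m w hk (hpre (k, w) (by simp))
    simp only [List.foldl_cons, List.flatMap_cons, List.foldl_append, hw]
    exact ih (k + 1) ((wiOps r (k, w)).foldl wiBlank m) (by omega)
      (fun p hp => hpre p (by simp [hp]))

-- A as one flat fold of blanking operations (under Pre_)
theorem wiA_ops (lines : List (Int × (List (Bool × String)))) (mov : List (String × List String))
    (hpre : Pre_wall_interaction lines mov) :
    wall_interaction lines mov = ((wiAllOps lines).foldl wiBlank (PySem.Dict.ofList mov)).items := by
  rw [wiA_unfold]
  unfold wiAllOps
  rw [List.foldl_flatMap]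
  congr 1
  apply PySem.List.foldl_congr_mem
  intro m line hline
  exact wi_inner_eq line.1 line.2 0 m le_rfl
    (fun p hp h1 h2 => ⟨(hpre line hline p hp h1 h2).1, (hpre line hline p hp h1 h2).2.1, (hpre line hline p hp h1 h2).2.2.1⟩)

-- a fold of set updates is one update by the flattened list
theorem wi_set_fold {α β : Type} [BEq α] (g : β → List α) :
    ∀ (l : List β) (s : PySem.Set α),
      l.foldl (fun s e => PySem.Set.update s (g e)) s = PySem.Set.update s (l.flatMap g) := by
  intro l
  induction l with
  | nil => intro s; simp [PySem.Set.update_nil]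
  | cons x xs ih => intro s; simp [List.flatMap_cons, PySem.Set.update_append, ih]

-- B's blanked set is exactly the set of all operations
theorem wiB_blanked (lines : List (Int × (List (Bool × String)))) :
    (lines.foldl
      (fun (s : PySem.Set (String × Int)) line =>
        (PySem.List.enumerate line.2 0).foldl
          (fun (s : PySem.Set (String × Int)) p =>
            if p.2.1 && decide (0 ≤ line.1) && decide (line.1 ≤ 7) && decide (0 ≤ p.1) && decide (p.1 ≤ 7) then
              if p.2.2 == "|" then
                PySem.Set.update s [(wiCell line.1 p.1 1, 1), (wiCell line.1 (p.1 + 1) 1, 3), (wiCell line.1 p.1 2, 1), (wiCell line.1 (p.1 + 1) 2, 3)]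
              else if p.2.2 == "-" then
                PySem.Set.update s [(wiCell line.1 p.1 1, 2), (wiCell line.1 (p.1 + 1) 1, 2), (wiCell line.1 p.1 2, 0), (wiCell line.1 (p.1 + 1) 2, 0)]
              else s
            else s)
          s)
      PySem.Set.empty) = PySem.Set.ofList (wiAllOps lines) := by
  have hbody : ∀ (line : Int × (List (Bool × String))) (s : PySem.Set (String × Int)),
      (PySem.List.enumerate line.2 0).foldl
          (fun (s : PySem.Set (String × Int)) p =>
            if p.2.1 && decide (0 ≤ line.1) && decide (line.1 ≤ 7) && decide (0 ≤ p.1) && decide (p.1 ≤ 7) then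
              if p.2.2 == "|" then
                PySem.Set.update s [(wiCell line.1 p.1 1, 1), (wiCell line.1 (p.1 + 1) 1, 3), (wiCell line.1 p.1 2, 1), (wiCell line.1 (p.1 + 1) 2, 3)]
              else if p.2.2 == "-" then
                PySem.Set.update s [(wiCell line.1 p.1 1, 2), (wiCell line.1 (p.1 + 1) 1, 2), (wiCell line.1 p.1 2, 0), (wiCell line.1 (p.1 + 1) 2, 0)]
              else s
            else s)
          s = PySem.Set.update s ((PySem.List.enumerate line.2 0).flatMap (wiOps line.1)) := by
    intro line s
    rw [← wi_set_fold]
    apply PySem.List.foldl_congr_mem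
    intro s p _
    unfold wiOps
    by_cases hg : (p.2.1 && decide (0 ≤ line.1) && decide (line.1 ≤ 7) && decide (0 ≤ p.1) && decide (p.1 ≤ 7)) = true
    · simp only [hg, if_true]
      by_cases h1 : p.2.2 == "|"
      · simp [h1]
      · by_cases h2 : p.2.2 == "-" <;> simp [h1, h2, PySem.Set.update_nil]
    · simp [hg, PySem.Set.update_nil]
  calc (lines.foldl _ PySem.Set.empty)
      = lines.foldl (fun s line => PySem.Set.update s ((PySem.List.enumerate line.2 0).flatMap (wiOps line.1))) PySem.Set.empty := by
        apply PySem.List.foldl_congr_mem; intro s line _; exact hbody line s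
    _ = PySem.Set.update PySem.Set.empty (wiAllOps lines) := by
        rw [wi_set_fold (fun line => (PySem.List.enumerate line.2 0).flatMap (wiOps line.1)) lines]
        rfl
    _ = PySem.Set.ofList (wiAllOps lines) := PySem.Set.update_empty _

-- B rewritten through the operation list
theorem wiB_ops (lines : List (Int × (List (Bool × String)))) (mov : List (String × List String)) :
    wall_interaction_alt lines mov =
      (PySem.Dict.ofList mov).items.map
        (fun q => (q.1, (PySem.List.enumerate q.2 0).map
          (fun iv => if (q.1, iv.1) ∈ wiAllOps lines then "  " else iv.2))) := by
  unfold wall_interaction_alt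
  rw [wiB_blanked]
  apply List.map_congr_left
  intro q _
  congr 1
  apply List.map_congr_left
  intro iv _
  have : (PySem.Set.ofList (wiAllOps lines)).contains (q.1, iv.1) = decide ((q.1, iv.1) ∈ wiAllOps lines) := by
    simp [PySem.Set.contains_eq_listContains, List.contains_iff_mem, PySem.Set.mem_ofList]
  rw [this]
  by_cases h : (q.1, iv.1) ∈ wiAllOps lines <;> simp [h]

-- C2: a fold of pySetD "  " at nonnegative slots is a pointwise rebuild
theorem wi_setfold (js : List Int) :
    ∀ (l0 : List String), (∀ j ∈ js, 0 ≤ j) →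
      js.foldl (fun l j => PySem.List.pySetD l j "  ") l0 =
        (PySem.List.enumerate l0 0).map (fun iv => if iv.1 ∈ js then "  " else iv.2) := by
  induction js with
  | nil =>
    intro l0 _
    simpa using PySem.List.map_snd_enumerate l0 0
  | cons j js ih =>
    intro l0 hj
    have hj0 : 0 ≤ j := hj j (by simp)
    simp only [List.foldl_cons]
    rw [ih (PySem.List.pySetD l0 j "  ") (fun x hx => hj x (by simp [hx]))]
    rw [PySem.List.pySetD_of_nonneg l0 "  " hj0]
    apply List.ext_getElem
    · simp [PySem.List.length_enumerate]
    · intro m h1 h2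
      have hlen : m < l0.length := by
        simpa [PySem.List.length_enumerate] using h2
      have hlen2 : m < (l0.set j.toNat "  ").length := by simpa using hlen
      rw [List.getElem_map, List.getElem_map,
        PySem.List.getElem_enumerate _ _ m (by simpa [PySem.List.length_enumerate] using hlen2),
        PySem.List.getElem_enumerate _ _ m (by simpa [PySem.List.length_enumerate] using hlen)]
      simp only [zero_add, List.mem_cons]
      by_cases hm : ((m : Int) ∈ js)
      · simp [hm]
      · by_cases hmj : ((m : Int) = j)
        · have ht : j.toNat = m := by omega
          simp [hm, hmj, ht, List.getElem_set]
        · have ht : ¬ (j.toNat = m) := by omega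
          simp [hm, hmj, ht, List.getElem_set]

-- C1: the value at one key through the whole blanking fold
theorem wi_getD_fold (ops : List (String × Int)) :
    ∀ (d : PySem.Dict String (List String)) (k : String),
      (ops.foldl wiBlank d).getD k [] =
        ((ops.filter (fun op => op.1 == k)).map (·.2)).foldl
          (fun l i => PySem.List.pySetD l i "  ") (d.getD k []) := by
  induction ops with
  | nil => intro d k; simp
  | cons op ops ih =>
    intro d k
    simp only [List.foldl_cons]
    rw [ih]
    by_cases hk : op.1 = k
    · have : (wiBlank d op).getD k [] = PySem.List.pySetD (d.getD k []) op.2 "  " := by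
        unfold wiBlank
        rw [PySem.Dict.getD_modify]
        simp [hk]
      simp [List.filter_cons, hk, this]
    · have hgd : (wiBlank d op).getD k [] = d.getD k [] := by
        unfold wiBlank
        rw [PySem.Dict.getD_modify, if_neg (fun h => hk h.symm)]
      simp [List.filter_cons, hk, hgd]

-- membership bridge: (k, i) is an op iff i is a slot filtered at key k
theorem wi_mem_filter (ops : List (String × Int)) (k : String) (i : Int) :
    (i ∈ (ops.filter (fun op => op.1 == k)).map (·.2)) ↔ (k, i) ∈ ops := by
  simp only [List.mem_map, List.mem_filter, beq_iff_eq]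
  constructor
  · rintro ⟨op, ⟨hmem, hk⟩, hi⟩
    have : op = (k, i) := by
      cases op; simp_all
    exact this ▸ hmem
  · intro h
    exact ⟨(k, i), ⟨h, rfl⟩, rfl⟩

-- core: a fold of blanking operations whose keys are all present is a pointwise rebuild of items
theorem wi_core (ops : List (String × Int)) (d : PySem.Dict String (List String))
    (hnd : d.keys.Nodup)
    (hkeys : ∀ op ∈ ops, op.1 ∈ d.keys)
    (hpos : ∀ op ∈ ops, 0 ≤ op.2) :
    (ops.foldl wiBlank d).items =
      d.items.map (fun q => (q.1, (PySem.List.enumerate q.2 0).map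
        (fun iv => if (q.1, iv.1) ∈ ops then "  " else iv.2))) := by
  have hfold : (ops.foldl wiBlank d) =
      ops.foldl (fun d op => d.modify (Prod.fst op) []
        ((fun (_ : PySem.Dict String (List String)) (op : String × Int) (l : List String) =>
            PySem.List.pySetD l op.2 "  ") d op)) d := rfl
  have hndA : (ops.foldl wiBlank d).keys.Nodup := by
    rw [hfold]; exact PySem.Dict.nodup_keys_foldl_modify_key ops Prod.fst [] _ d hnd
  have hkeysA : (ops.foldl wiBlank d).keys = d.keys := by
    rw [hfold, PySem.Dict.keys_foldl_modify_key ops Prod.fst [] _ d]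
    rw [PySem.Set.update_eq_append_filter]
    have hfilter : (PySem.Set.ofList (ops.map Prod.fst)).filter (fun y => !(PySem.Set.contains d.keys y)) = [] := by
      apply List.filter_eq_nil_iff.mpr
      intro y hy
      have hy1 : y ∈ ops.map Prod.fst := (PySem.Set.mem_ofList _ _).mp hy
      obtain ⟨op, hmem, hop⟩ := List.mem_map.mp hy1
      have hy2 : y ∈ d.keys := hop ▸ hkeys op hmem
      simp [PySem.Set.contains_iff]
      exact hy2
    rw [hfilter, List.append_nil]
  rw [PySem.Dict.items_eq_map_keys _ hndA [], PySem.Dict.items_eq_map_keys d hnd [], hkeysA,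
    List.map_map]
  apply List.map_congr_left
  intro k _
  simp only [Function.comp]
  congr 1
  rw [wi_getD_fold ops d k,
    wi_setfold ((ops.filter (fun op => op.1 == k)).map (·.2)) (d.getD k [])
      (by
        intro j hjm
        obtain ⟨op, hmem, hop⟩ := List.mem_map.mp hjm
        exact hop ▸ hpos op (List.mem_filter.mp hmem).1)]
  apply List.map_congr_left
  intro iv _
  simp only [wi_mem_filter]

-- every operation generated under Pre_ has a present key and a nonnegative slot
theorem wi_ops_sound (lines : List (Int × (List (Bool × String)))) (mov : List (String × List String))
    (hpre : Pre_wall_interaction lines mov) :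
    (∀ op ∈ wiAllOps lines, op.1 ∈ (PySem.Dict.ofList mov).keys) ∧
    (∀ op ∈ wiAllOps lines, 0 ≤ op.2) := by
  have keymem : ∀ k : String, 0 < ((PySem.Dict.ofList mov).getD k []).length →
      k ∈ (PySem.Dict.ofList mov).keys := by
    intro k hlen
    by_contra hmem
    have hc : (PySem.Dict.ofList mov).contains k = false := by
      rw [PySem.Dict.contains_eq_decide_mem_keys]
      simp [hmem]
    rw [PySem.Dict.getD_of_not_contains _ _ hc] at hlen
    simp at hlen
  have main : ∀ op ∈ wiAllOps lines, op.1 ∈ (PySem.Dict.ofList mov).keys ∧ 0 ≤ op.2 := by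
    intro op hop
    unfold wiAllOps at hop
    rw [List.mem_flatMap] at hop
    obtain ⟨line, hline, hop⟩ := hop
    rw [List.mem_flatMap] at hop
    obtain ⟨p, hp, hop⟩ := hop
    unfold wiOps at hop
    by_cases hg : (p.2.1 && decide (0 ≤ line.1) && decide (line.1 ≤ 7) && decide (0 ≤ p.1) && decide (p.1 ≤ 7)) = true
    · rw [if_pos hg] at hop
      have hb := hg
      simp only [Bool.and_eq_true, decide_eq_true_eq] at hb
      obtain ⟨⟨⟨⟨hact, hr0⟩, hr7⟩, hc0⟩, hc7⟩ := hb
      by_cases h1 : p.2.2 = "|"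
      · have hl := ((hpre line hline p hp hact (Or.inl h1)).2.2.2.1) h1
        rw [if_pos (by simp [h1])] at hop
        simp only [List.mem_cons, List.not_mem_nil, or_false] at hop
        obtain ⟨ha, hb, hc, hd⟩ := hl
        have m1 : wiCell line.1 p.1 1 ∈ (PySem.Dict.ofList mov).keys := keymem _ (by omega)
        have m2 : wiCell line.1 (p.1 + 1) 1 ∈ (PySem.Dict.ofList mov).keys := keymem _ (by omega)
        have m3 : wiCell line.1 p.1 2 ∈ (PySem.Dict.ofList mov).keys := keymem _ (by omega)
        have m4 : wiCell line.1 (p.1 + 1) 2 ∈ (PySem.Dict.ofList mov).keys := keymem _ (by omega)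
        rcases hop with h | h | h | h <;> subst h <;>
          exact ⟨by first | exact m1 | exact m2 | exact m3 | exact m4, by simp⟩
      · by_cases h2 : p.2.2 = "-"
        · have hl := ((hpre line hline p hp hact (Or.inr h2)).2.2.2.2) h2
          rw [if_neg (by simp [h1]), if_pos (by simp [h2])] at hop
          simp only [List.mem_cons, List.not_mem_nil, or_false] at hop
          obtain ⟨ha, hb, hc, hd⟩ := hl
          have m1 : wiCell line.1 p.1 1 ∈ (PySem.Dict.ofList mov).keys := keymem _ (by omega)
          have m2 : wiCell line.1 (p.1 + 1) 1 ∈ (PySem.Dict.ofList mov).keys := keymem _ (by omega)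
          have m3 : wiCell line.1 p.1 2 ∈ (PySem.Dict.ofList mov).keys := keymem _ (by omega)
          have m4 : wiCell line.1 (p.1 + 1) 2 ∈ (PySem.Dict.ofList mov).keys := keymem _ (by omega)
          rcases hop with h | h | h | h <;> subst h <;>
            exact ⟨by first | exact m1 | exact m2 | exact m3 | exact m4, by simp⟩
        · rw [if_neg (by simp [h1]), if_neg (by simp [h2])] at hop
          simp at hop
    · rw [if_neg hg] at hop
      simp at hop
  exact ⟨fun op h => (main op h).1, fun op h => (main op h).2⟩

-- ===== VERDICT (by name: the statement is the Claim_ definition above) =====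
theorem wall_interaction_spec : Claim_equal_wall_interaction := by
  intro lines mov _ hpre
  unfold Spec_wall_interaction
  rw [wiA_ops lines mov hpre, wiB_ops lines mov]
  exact wi_core (wiAllOps lines) (PySem.Dict.ofList mov)
    (PySem.Dict.nodup_keys_ofList mov)
    (wi_ops_sound lines mov hpre).1
    (wi_ops_sound lines mov hpre).2
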